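-- pv_equiv track=rewrite | github.com/HlighT-Git/BasicPython | PY01027/PY01027.py | isValidNum
-- ===== SOURCE A (Python) =====
-- def isValidNum(num):
--     i = 0
--     while i < len(num):
--         jump = 1
--         if num[i:i+3] == '688':
--             jump = 3
--         elif num[i:i+2] == '68':
--             jump = 2
--         elif num[i] != '6':
--             return False
--         i += jump
--     return True
-- ===== SOURCE B (Python) =====
-- def isValidNum(num):
--     if not num:
--         return True
--     return (num[0] == '6'
--             and all(c == '6' or c == '8' for c in num)
--             and '888' not in num)
-- ===== Notes on version B (the rewrite author's own statement) =====
-- stated objective: simpler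
-- what changed: Replaces the greedy left-to-right token scanner (consuming '688'/'68'/'6' with variable jumps) by three independent whole-string property checks: first char is '6', every char is '6' or '8', and no '888' substring.
import Mathlib
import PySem

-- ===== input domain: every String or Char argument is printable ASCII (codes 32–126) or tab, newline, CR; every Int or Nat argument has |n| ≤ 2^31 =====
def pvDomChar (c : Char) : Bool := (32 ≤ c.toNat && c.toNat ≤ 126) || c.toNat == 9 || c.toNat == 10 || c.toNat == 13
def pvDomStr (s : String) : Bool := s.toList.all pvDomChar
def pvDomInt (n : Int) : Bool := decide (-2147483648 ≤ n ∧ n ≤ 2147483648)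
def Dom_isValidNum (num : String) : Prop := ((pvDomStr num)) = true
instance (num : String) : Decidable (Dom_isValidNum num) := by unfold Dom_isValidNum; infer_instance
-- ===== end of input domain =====

-- B replaces A's greedy '688'/'68'/'6' token scanner by three independent whole-string
-- property checks (starts with '6', only '6'/'8', no '888' substring); objective: simpler.


-- ===== PORT A =====
-- the while loop over i with jumps 3/2/1, as structural recursion on the remaining chars;
-- branch order matches Python: '688' first, then '68', then the single-char check
def isValidNumGo : List Char → Bool
  | '6' :: '8' :: '8' :: rest => isValidNumGo rest
  | '6' :: '8' :: rest => isValidNumGo rest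
  | c :: rest => if c ≠ '6' then false else isValidNumGo rest
  | [] => true

def isValidNum (num : String) : Bool := isValidNumGo num.toList

-- ===== PORT B =====
def isValidNum_alt (num : String) : Bool :=
  match num.toList with
  | [] => true
  | c :: _ =>
      (c == '6')
      && num.toList.all (fun d => d == '6' || d == '8')
      && !(PySem.Str.isIn "888" num)

-- ===== PRECONDITION & SPEC =====
def Spec_isValidNum (num : String) (out : Bool) : Prop := out = isValidNum_alt num
instance (num : String) (out : Bool) : Decidable (Spec_isValidNum num out) := by unfold Spec_isValidNum; infer_instance

-- ===== CLAIM (what is proved, stated in full; the proofs are below) =====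
def Claim_equal_isValidNum : Prop := ∀ (num : String), Dom_isValidNum num → Spec_isValidNum num (isValidNum num)

-- ===== LEMMAS AND PROOFS =====

lemma isIn_eq_decide (sub s : List Char) :
    PySem.Chars.isIn sub s = decide (sub <:+: s) := by
  by_cases h : sub <:+: s
  · simp [h, (PySem.Chars.isIn_iff_infix sub s).mpr h]
  · simp [h, (PySem.Chars.isIn_eq_false_iff sub s).mpr h]

lemma goA_eq_props (s : List Char) :
    isValidNumGo s =
      (match s with
       | [] => true
       | c :: _ =>
           (c == '6')
           && s.all (fun d => d == '6' || d == '8')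
           && !(decide (['8','8','8'] <:+: s))) := by
  induction s using isValidNumGo.induct with
  | case1 rest ih =>
      cases rest with
      | nil => simp [isValidNumGo, List.infix_cons_iff, List.cons_prefix_cons]
      | cons c t =>
          by_cases h8 : c = '8'
          · subst h8
            simp [isValidNumGo, ih, List.infix_cons_iff, List.cons_prefix_cons]
          · by_cases h6 : c = '6'
            · subst h6
              simp [isValidNumGo, ih, List.infix_cons_iff, List.cons_prefix_cons]
            · have e6 : (c == '6') = false := beq_eq_false_iff_ne.mpr h6
              have e8 : (c == '8') = false := beq_eq_false_iff_ne.mpr h8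
              simp [isValidNumGo, ih, List.infix_cons_iff, List.cons_prefix_cons,
                    Ne.symm h8, e6, e8]
  | case2 rest h ih =>
      cases rest with
      | nil => simp [isValidNumGo, List.infix_cons_iff, List.cons_prefix_cons]
      | cons c t =>
          have h8 : c ≠ '8' := fun hc => h t (by rw [hc])
          by_cases h6 : c = '6'
          · subst h6
            simp [isValidNumGo, ih, List.infix_cons_iff, List.cons_prefix_cons]
          · have e6 : (c == '6') = false := beq_eq_false_iff_ne.mpr h6
            have e8 : (c == '8') = false := beq_eq_false_iff_ne.mpr h8
            simp [isValidNumGo, ih, List.infix_cons_iff, List.cons_prefix_cons,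
                  Ne.symm h8, e6, e8]
  | case3 c rest h1 h2 hne =>
      simp [isValidNumGo, hne]
  | case4 c rest h1 h2 hne ih =>
      have hc : c = '6' := not_not.mp hne
      subst hc
      cases rest with
      | nil => simp [isValidNumGo]; decide
      | cons d t =>
          have hd : d ≠ '8' := fun hdd => h2 t rfl (by rw [hdd])
          rw [isValidNumGo.eq_def]
          split
          · rename_i heq; rw [List.cons.injEq, List.cons.injEq] at heq
            exact absurd heq.2.1 hd
          · rename_i heq; rw [List.cons.injEq, List.cons.injEq] at heq
            exact absurd heq.2.1 hd
          · rename_i c' rest' _ _ heq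
            rw [List.cons.injEq] at heq
            obtain ⟨hc', hr'⟩ := heq
            subst hc'; subst hr'
            by_cases hd6 : d = '6'
            · subst hd6
              simp [ih, List.infix_cons_iff, List.cons_prefix_cons]
            · have e6 : (d == '6') = false := beq_eq_false_iff_ne.mpr hd6
              have e8 : (d == '8') = false := beq_eq_false_iff_ne.mpr hd
              simp [ih, List.infix_cons_iff, List.cons_prefix_cons, Ne.symm hd, e6, e8]
          · rename_i heq; exact absurd heq (List.cons_ne_nil _ _)
  | case5 => simp [isValidNumGo]

-- ===== VERDICT (by name: the statement is the Claim_ definition above) =====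
theorem isValidNum_spec : Claim_equal_isValidNum := by
  intro num _
  unfold Spec_isValidNum isValidNum isValidNum_alt
  rw [goA_eq_props]
  cases h : num.toList with
  | nil => simp
  | cons c t =>
      simp only [PySem.Str.isIn_eq, isIn_eq_decide]
      have h888 : "888".toList = ['8','8','8'] := rfl
      rw [h888, h]
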